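-- pv_equiv track=rewrite | github.com/tejaswi0905/DSA-Python | Greedy/greedy.py | largest_coin
-- ===== SOURCE A (Python) =====
-- def pow(a, b):
--     ans = 1
--     while b > 0:
--         if (b & 1) == 1:
--             ans = ans * a
--         a = a * a
--         b = b >> 1
--     return ans
--
-- def largest_coin(amount):
--     k = 0
--     current = 1
--     coin = 1
--     while current <= amount:
--         coin = current
--         current = pow(5, k)
--         k += 1
--     return coin
-- ===== SOURCE B (Python) =====
-- def largest_coin(amount):
--     coin = 1
--     while coin * 5 <= amount:
--         coin = coin * 5
--     return coin
-- ===== Notes on version B (the rewrite author's own statement) =====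
-- stated objective: simpler
-- what changed: Replaced the counter-plus-binary-exponentiation loop (recomputing pow(5,k) from scratch each iteration) with a single flat loop that multiplies the coin by 5 incrementally.
import Mathlib
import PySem

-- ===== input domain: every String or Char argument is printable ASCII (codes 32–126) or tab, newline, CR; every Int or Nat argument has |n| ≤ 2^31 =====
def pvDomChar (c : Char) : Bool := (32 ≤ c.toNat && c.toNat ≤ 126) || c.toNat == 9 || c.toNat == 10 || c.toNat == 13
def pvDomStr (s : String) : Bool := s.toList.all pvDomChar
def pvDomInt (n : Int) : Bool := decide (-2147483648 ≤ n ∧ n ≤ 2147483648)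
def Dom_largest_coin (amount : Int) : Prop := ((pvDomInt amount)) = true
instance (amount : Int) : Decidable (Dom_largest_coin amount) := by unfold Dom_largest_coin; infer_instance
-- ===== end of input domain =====

-- B drops the counter-plus-binary-pow recomputation and multiplies the coin by 5 incrementally
-- (one flat loop instead of a loop calling a square-and-multiply helper); objective: simpler.

-- ===== PORT A =====
-- pow(a, b): square-and-multiply; Python's `b & 1` = mod b 2 and `b >> 1` = floordiv b 2 (exact for all ints)
def powLoop (ans a b : Int) : Int :=
  if h : 0 < b then
    powLoop (if PySem.Int.mod b 2 == 1 then ans * a else ans) (a * a) (PySem.Int.floordiv b 2)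
  else ans
termination_by b.toNat
decreasing_by
  have := PySem.Int.floordiv_eq_ediv_of_pos (a := b) (b := 2) (by omega)
  omega

def pyPow (a b : Int) : Int := powLoop 1 a b

-- while current <= amount: coin = current; current = pow(5, k); k += 1
-- fuel is a totality guard only; `amount.toNat + 2` is proved sufficient below
def aLoop (amount : Int) : Nat → Int → Int → Int → Int
  | 0, _, _, coin => coin
  | fuel + 1, k, current, coin =>
    if current ≤ amount then aLoop amount fuel (k + 1) (pyPow 5 k) current
    else coin

def largest_coin (amount : Int) : Int :=
  aLoop amount (amount.toNat + 2) 0 1 1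

-- ===== PORT B =====
-- while coin * 5 <= amount: coin = coin * 5  (fuel is a totality guard, proved sufficient below)
def bLoop (amount : Int) : Nat → Int → Int
  | 0, coin => coin
  | fuel + 1, coin =>
    if coin * 5 ≤ amount then bLoop amount fuel (coin * 5)
    else coin

def largest_coin_alt (amount : Int) : Int :=
  bLoop amount (amount.toNat + 1) 1

-- ===== PRECONDITION & SPEC =====
def Spec_largest_coin (amount : Int) (out : Int) : Prop := out = largest_coin_alt amount
instance (amount : Int) (out : Int) : Decidable (Spec_largest_coin amount out) := by unfold Spec_largest_coin; infer_instance

-- ===== CLAIM (what is proved, stated in full; the proofs are below) =====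
def Claim_equal_largest_coin : Prop := ∀ (amount : Int), Dom_largest_coin amount → Spec_largest_coin amount (largest_coin amount)

-- ===== LEMMAS AND PROOFS =====

theorem powLoop_char (n : Nat) : ∀ b : Int, b.toNat = n → ∀ ans a : Int,
    powLoop ans a b = ans * a ^ b.toNat := by
  induction n using Nat.strong_induction_on with
  | _ n ih =>
    intro b hb ans a
    rw [powLoop]
    split_ifs with h hodd
    · have hfd : PySem.Int.floordiv b 2 = b / 2 :=
        PySem.Int.floordiv_eq_ediv_of_pos (by omega)
      have hmd : PySem.Int.mod b 2 = b % 2 :=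
        PySem.Int.mod_eq_emod_of_pos (by omega)
      have hodd' : b % 2 = 1 := by rw [← hmd]; exact beq_iff_eq.mp hodd
      have hlt : (PySem.Int.floordiv b 2).toNat < n := by omega
      rw [ih _ hlt _ rfl]
      have hq : (PySem.Int.floordiv b 2).toNat = b.toNat / 2 := by omega
      rw [hq]
      set q := b.toNat / 2 with hqd
      have hbn : b.toNat = 2 * q + 1 := by omega
      rw [hbn, show ((a * a : Int)) ^ q = a ^ (2 * q) from by
        rw [mul_pow, ← pow_add, two_mul], pow_succ]
      ring
    · have hfd : PySem.Int.floordiv b 2 = b / 2 :=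
        PySem.Int.floordiv_eq_ediv_of_pos (by omega)
      have hmd : PySem.Int.mod b 2 = b % 2 :=
        PySem.Int.mod_eq_emod_of_pos (by omega)
      have heven : b % 2 = 0 := by
        rcases Int.emod_two_eq_zero_or_one b with h0 | h1
        · exact h0
        · exact absurd (beq_iff_eq.mpr (by rw [hmd, h1])) hodd
      have hlt : (PySem.Int.floordiv b 2).toNat < n := by omega
      rw [ih _ hlt _ rfl]
      have hq : (PySem.Int.floordiv b 2).toNat = b.toNat / 2 := by omega
      rw [hq]
      set q := b.toNat / 2 with hqd
      have hbn : b.toNat = 2 * q := by omega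
      rw [hbn, show ((a * a : Int)) ^ q = a ^ (2 * q) from by
        rw [mul_pow, ← pow_add, two_mul]]
    · have h0 : b.toNat = 0 := by omega
      simp [h0]

theorem pyPow_five (n : Nat) : pyPow 5 (n : Int) = (5 : Int) ^ n := by
  rw [pyPow, powLoop_char ((n : Int).toNat) _ rfl, one_mul, Int.toNat_natCast]

theorem lt_pow_five (n : Nat) : (n : Int) < (5 : Int) ^ n := by
  have h : n < 5 ^ n := Nat.lt_pow_self (by omega)
  calc (n : Int) < ((5 ^ n : Nat) : Int) := by exact_mod_cast h
    _ = (5 : Int) ^ n := by push_cast; ring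

-- with sufficient fuel, one extra unit of fuel does not change bLoop's result
theorem bLoop_fuel_succ (amount : Int) : ∀ (f : Nat) (n : Nat),
    amount < 5 ^ n * 5 ^ f → bLoop amount f ((5 : Int) ^ n) = bLoop amount (f + 1) ((5 : Int) ^ n) := by
  intro f
  induction f with
  | zero =>
    intro n h
    simp only [pow_zero, mul_one] at h
    rw [bLoop, bLoop]
    have : ¬ ((5:Int) ^ n * 5 ≤ amount) := by
      have : (0:Int) < 5 ^ n := by positivity
      nlinarith
    rw [if_neg this]
  | succ f ih =>
    intro n h
    rw [bLoop, bLoop]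
    split_ifs with h5
    · have h' : (5:Int) ^ n * 5 = 5 ^ (n + 1) := by ring
      rw [h']
      exact ih (n + 1) (by rw [pow_succ] at *; nlinarith [pow_pos (show (0:Int) < 5 by norm_num) n])
    · rfl

-- the core simulation: from the aligned state (k = n+1, current = 5^n, any coin),
-- A's loop computes the same value as B's loop started at coin = 5^n
theorem loop_sim (amount : Int) : ∀ (f : Nat) (n : Nat) (c : Int),
    (5 : Int) ^ n ≤ amount → amount < 5 ^ n * 5 ^ f →
    aLoop amount (f + 1) ((n : Int) + 1) ((5 : Int) ^ n) c = bLoop amount f ((5 : Int) ^ n) := by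
  intro f
  induction f with
  | zero =>
    intro n c h1 h2
    simp only [pow_zero, mul_one] at h2
    omega
  | succ f ih =>
    intro n c h1 h2
    rw [aLoop, if_pos h1, bLoop]
    have hp : pyPow 5 ((n : Int) + 1) = (5 : Int) ^ (n + 1) := by
      have : ((n : Int) + 1) = ((n + 1 : Nat) : Int) := by push_cast; ring
      rw [this, pyPow_five]
    split_ifs with h5
    · have h5' : (5:Int) ^ (n + 1) ≤ amount := by
        calc (5:Int) ^ (n+1) = 5 ^ n * 5 := by ring
          _ ≤ amount := h5
      have h2' : amount < 5 ^ (n + 1) * 5 ^ f := by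
        rw [pow_succ] at h2 ⊢
        nlinarith [pow_pos (show (0:Int) < 5 by norm_num) n]
      have := ih (n + 1) ((5:Int) ^ n) h5' h2'
      rw [hp]
      have hcast : ((n : Int) + 1) + 1 = ((n + 1 : Nat) : Int) + 1 := by push_cast; ring
      rw [hcast]
      exact this
    · rw [aLoop, hp]
      have : ¬ ((5:Int) ^ (n + 1) ≤ amount) := by
        intro hc
        exact h5 (by calc (5:Int) ^ n * 5 = 5 ^ (n+1) := by ring
          _ ≤ amount := hc)
      rw [if_neg this]

theorem main_equiv (amount : Int) : largest_coin amount = largest_coin_alt amount := by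
  unfold largest_coin largest_coin_alt
  by_cases h1 : (1 : Int) ≤ amount
  · -- first iteration of A: coin := 1, current := pow(5,0) = 1, k := 1
    have hstep : aLoop amount (amount.toNat + 2) 0 1 1
        = aLoop amount (amount.toNat + 1) 1 1 1 := by
      rw [aLoop, if_pos h1]
      have hone : pyPow 5 (0 : Int) = 1 := by simpa using pyPow_five 0
      rw [hone]
      norm_num
    rw [hstep]
    have hlt : amount < 5 ^ amount.toNat := by
      have := lt_pow_five amount.toNat
      omega
    have hsim := loop_sim amount amount.toNat 0 1
      (by norm_num; omega) (by simpa using hlt)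
    simp only [pow_zero, Nat.cast_zero, zero_add] at hsim
    rw [hsim]
    have := bLoop_fuel_succ amount amount.toNat 0 (by simpa using hlt)
    simpa using this
  · -- amount < 1: neither loop iterates, both return 1
    rw [aLoop, if_neg (by omega), bLoop, if_neg (by omega)]

-- ===== VERDICT (by name: the statement is the Claim_ definition above) =====
theorem largest_coin_spec : Claim_equal_largest_coin := by
  intro amount _
  unfold Spec_largest_coin
  exact main_equiv amount
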